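-- pv_equiv track=rewrite | github.com/vgrigoriu/AdventOfCode | 2024/day6.py | add_obstacle
-- ===== SOURCE A (Python) =====
-- def add_obstacle(map, x, y):
--     new_map = []
--     for i in range(0, len(map)):
--         new_map.append("")
--         for j in range(0, len(map[i])):
--             if i == x and j == y:
--                 new_map[i] += "#"
--             else:
--                 new_map[i] += map[i][j]
--
--     return new_map
-- ===== SOURCE B (Python) =====
-- def add_obstacle(map, x, y):
--     return [
--         row[:y] + "#" + row[y + 1:] if i == x and 0 <= y < len(row) else row
--         for i, row in enumerate(map)
--     ]
-- ===== Notes on version B (the rewrite author's own statement) =====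
-- stated objective: simpler
-- what changed: Replaces A's nested character-by-character rebuilding of every row with a single row-level comprehension over enumerate that splices '#' into the one affected row by slicing.
import Mathlib
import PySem

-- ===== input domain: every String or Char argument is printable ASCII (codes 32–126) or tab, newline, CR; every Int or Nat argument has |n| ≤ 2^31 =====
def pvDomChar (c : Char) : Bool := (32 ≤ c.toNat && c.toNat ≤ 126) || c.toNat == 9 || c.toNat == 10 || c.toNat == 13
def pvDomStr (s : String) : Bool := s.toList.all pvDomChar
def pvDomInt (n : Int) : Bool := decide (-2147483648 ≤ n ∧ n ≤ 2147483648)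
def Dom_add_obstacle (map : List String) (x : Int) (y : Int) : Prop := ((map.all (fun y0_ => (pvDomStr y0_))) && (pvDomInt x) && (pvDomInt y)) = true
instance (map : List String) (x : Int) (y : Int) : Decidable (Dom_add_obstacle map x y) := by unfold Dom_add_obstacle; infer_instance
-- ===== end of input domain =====

-- B replaces A's nested character-by-character row rebuilding with one row-level map over enumerate that splices '#' via slices; objective: simpler.


-- ===== PORT A =====
-- 'new_map.append("")' followed by 'new_map[i] += …' builds row i character by character,
-- left to right; modelled as building row i's characters and appending the finished string.
def add_obstacle (map : List String) (x : Int) (y : Int) : List String :=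
  (PySem.List.pyRange 0 map.length 1).foldl (fun nm i =>
    nm ++ [String.ofList ((PySem.List.pyRange 0 (PySem.List.pyGetD map i "").toList.length 1).foldl
      (fun s j => if i = x ∧ j = y then s ++ ['#']
                  else s ++ [PySem.List.pyGetD (PySem.List.pyGetD map i "").toList j ' ']) [])]) []

-- ===== PORT B =====
def add_obstacle_alt (map : List String) (x : Int) (y : Int) : List String :=
  (PySem.List.enumerate map 0).map (fun p =>
    if p.1 = x ∧ 0 ≤ y ∧ y < PySem.Str.len p.2 then
      String.ofList (PySem.Chars.slice p.2.toList none (some y) ++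
        '#' :: PySem.Chars.slice p.2.toList (some (y + 1)) none)
    else p.2)

-- ===== PRECONDITION & SPEC =====
def Spec_add_obstacle (map : List String) (x : Int) (y : Int) (out : List String) : Prop := out = add_obstacle_alt map x y
instance (map : List String) (x : Int) (y : Int) (out : List String) : Decidable (Spec_add_obstacle map x y out) := by unfold Spec_add_obstacle; infer_instance

-- ===== CLAIM (what is proved, stated in full; the proofs are below) =====
def Claim_equal_add_obstacle : Prop := ∀ (map : List String) (x : Int) (y : Int), Dom_add_obstacle map x y → Spec_add_obstacle map x y (add_obstacle map x y)

-- ===== LEMMAS AND PROOFS =====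

-- A's inner character loop over one row equals B's row treatment: the row unchanged, or
-- take/‘#’/drop when the guard i = x ∧ 0 ≤ y < len(row) holds.
theorem rowA_eq (row : List Char) (i x y : Int) :
    (PySem.List.pyRange 0 (row.length : Int) 1).foldl
      (fun s j => if i = x ∧ j = y then s ++ ['#'] else s ++ [PySem.List.pyGetD row j ' ']) []
    = if i = x ∧ 0 ≤ y ∧ y < (row.length : Int) then
        row.take y.toNat ++ '#' :: row.drop (y.toNat + 1)
      else row := by
  have hfun : (fun (s : List Char) j => if i = x ∧ j = y then s ++ ['#'] else s ++ [PySem.List.pyGetD row j ' '])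
      = fun s j => s ++ [if i = x ∧ j = y then '#' else PySem.List.pyGetD row j ' '] := by
    funext s j; by_cases h : i = x ∧ j = y <;> simp [h]
  rw [hfun, PySem.List.foldl_append_singleton_eq_map, PySem.List.pyRange_zero_natCast, List.map_map,
    List.nil_append]
  by_cases hc : i = x ∧ 0 ≤ y ∧ y < (row.length : Int)
  · obtain ⟨hix, hy0, hyn⟩ := hc
    have hyt : y.toNat < row.length := by omega
    rw [if_pos ⟨hix, hy0, hyn⟩]
    apply List.ext_getElem
    · simp only [List.length_map, List.length_range, List.length_append, List.length_take,
        List.length_cons, List.length_drop]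
      omega
    · intro k hk1 hk2
      have hklen : k < row.length := by simpa using hk1
      simp only [List.getElem_map, List.getElem_range, Function.comp_apply, hix, true_and]
      by_cases hk : (k : Int) = y
      · have hkt : k = y.toNat := by omega
        rw [if_pos hk, List.getElem_append_right (by simp only [List.length_take]; omega)]
        simp only [List.length_take, List.getElem_cons]
        rw [dif_pos (by omega)]
      · rw [if_neg hk, PySem.List.pyGetD_natCast, List.getD_eq_getElem _ _ hklen]
        by_cases hlt : k < y.toNat
        · rw [List.getElem_append_left (by simp only [List.length_take]; omega)]
          simp [List.getElem_take]
        · rw [List.getElem_append_right (by simp only [List.length_take]; omega)]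
          simp only [List.length_take, List.getElem_cons]
          rw [dif_neg (by omega)]
          rw [List.getElem_drop]
          congr 1; omega
  · rw [if_neg hc]
    apply List.ext_getElem
    · simp only [List.length_map, List.length_range]
    · intro k hk1 hk2
      simp only [List.getElem_map, List.getElem_range, Function.comp_apply]
      rw [if_neg (by rintro ⟨h1, h2⟩; exact hc ⟨h1, by omega⟩)]
      rw [PySem.List.pyGetD_natCast, List.getD_eq_getElem _ _ hk2]

-- ===== VERDICT (by name: the statement is the Claim_ definition above) =====
theorem add_obstacle_spec : Claim_equal_add_obstacle := by
  intro map x y _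
  unfold Spec_add_obstacle add_obstacle add_obstacle_alt
  rw [PySem.List.foldl_append_singleton_eq_map, List.nil_append,
    PySem.List.enumerate_eq_map_pyRange map "", List.map_map]
  have hlen : PySem.List.len map = (map.length : Int) := rfl
  rw [hlen]
  apply List.map_congr_left
  intro i hi
  rw [PySem.List.mem_pyRange_one] at hi
  simp only [Function.comp_apply]
  rw [rowA_eq]
  set s := PySem.List.pyGetD map i "" with hs
  have hstr : PySem.Str.len s = (s.toList.length : Int) := by simp
  by_cases hc : i = x ∧ 0 ≤ y ∧ y < (s.toList.length : Int)
  · obtain ⟨h1, h2, h3⟩ := hc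
    rw [if_pos ⟨h1, h2, h3⟩, if_pos ⟨h1, by rw [hstr]; exact ⟨h2, h3⟩⟩]
    congr 1
    simp only [PySem.Chars.slice_eq_listSlice]
    rw [PySem.List.slice_to _ h2, PySem.List.slice_from _ (by omega : (0:Int) ≤ y + 1)]
    have h4 : (y + 1).toNat = y.toNat + 1 := by omega
    rw [h4]
  · rw [if_neg hc, if_neg (by rw [hstr]; exact hc)]
    simp
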